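-- pv_equiv track=rewrite | github.com/khengleng/YeayMonny | chat/fengshui.py | _annual_center_star
-- ===== SOURCE A (Python) =====
-- def _reduce_to_digit(n: int) -> int:
--     value = n
--     while value > 9:
--         value = sum(int(d) for d in str(value))
--     return value
--
-- def _annual_center_star(year: int) -> int:
--     yy = year % 100
--     reduced = _reduce_to_digit((yy // 10) + (yy % 10))
--     base = 9 if year >= 2000 else 10
--     center = base - reduced
--     while center <= 0:
--         center += 9
--     return center
-- ===== SOURCE B (Python) =====
-- def _annual_center_star(year: int) -> int:
--     yy = year % 100
--     m = yy // 10 + yy % 10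
--     reduced = 1 + (m - 1) % 9 if m else 0
--     center = (9 if year >= 2000 else 10) - reduced
--     return center if center > 0 else center + 9
-- ===== Notes on version B (the rewrite author's own statement) =====
-- stated objective: simpler
-- what changed: Replaced the iterative digit-sum reduction loop with the closed-form digital root 1+(m-1)%9 (0 for m=0) and the while center<=0 normalisation loop with a single conditional +9.
import Mathlib
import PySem

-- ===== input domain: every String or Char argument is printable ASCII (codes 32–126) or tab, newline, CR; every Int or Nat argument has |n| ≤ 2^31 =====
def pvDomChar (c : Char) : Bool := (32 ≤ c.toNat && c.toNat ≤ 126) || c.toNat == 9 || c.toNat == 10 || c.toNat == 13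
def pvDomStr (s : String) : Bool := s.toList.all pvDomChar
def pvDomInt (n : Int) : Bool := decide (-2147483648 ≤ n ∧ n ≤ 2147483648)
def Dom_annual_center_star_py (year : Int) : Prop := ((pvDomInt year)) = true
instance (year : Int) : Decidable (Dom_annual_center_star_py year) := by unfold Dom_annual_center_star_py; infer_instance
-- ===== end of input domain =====

-- B replaces A's two while-loops by the closed-form digital root and a single conditional +9 (objective: simpler).

-- ===== PORT A =====
-- sum(int(d) for d in str(value)): exact whenever str(value) consists of digit characters,
-- which holds at every call site of the loop body (value > 9).
def pvDigitSum (v : Int) : Int :=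
  ((PySem.Int.toChars v).map (fun c => ((c.toNat : Int) - 48))).sum

-- 'while value > 9': fuel recursion; each iteration strictly decreases a value > 9,
-- so n.natAbs + 1 iterations always suffice (the fuel only makes the loop total).
def pvReduceLoop : Nat → Int → Int
  | 0, v => v
  | f + 1, v => if v > 9 then pvReduceLoop f (pvDigitSum v) else v

def reduce_to_digit_py (n : Int) : Int := pvReduceLoop (n.natAbs + 1) n

-- 'while center <= 0': fuel recursion; each iteration adds 9, so c.natAbs + 1 suffices.
def pvCenterLoop : Nat → Int → Int
  | 0, c => c
  | f + 1, c => if c ≤ 0 then pvCenterLoop f (c + 9) else c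

def annual_center_star_py (year : Int) : Int :=
  let yy := PySem.Int.mod year 100
  let reduced := reduce_to_digit_py (PySem.Int.floordiv yy 10 + PySem.Int.mod yy 10)
  let base : Int := if year ≥ 2000 then 9 else 10
  pvCenterLoop ((base - reduced).natAbs + 1) (base - reduced)

-- ===== PORT B =====
def annual_center_star_py_alt (year : Int) : Int :=
  let yy := PySem.Int.mod year 100
  let m := PySem.Int.floordiv yy 10 + PySem.Int.mod yy 10
  let reduced := if m ≠ 0 then 1 + PySem.Int.mod (m - 1) 9 else 0
  let center := (if year ≥ 2000 then (9 : Int) else 10) - reduced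
  if center > 0 then center else center + 9

-- ===== PRECONDITION & SPEC =====
def Spec_annual_center_star_py (year : Int) (out : Int) : Prop := out = annual_center_star_py_alt year
instance (year : Int) (out : Int) : Decidable (Spec_annual_center_star_py year out) := by unfold Spec_annual_center_star_py; infer_instance

-- ===== CLAIM (what is proved, stated in full; the proofs are below) =====
def Claim_equal_annual_center_star_py : Prop := ∀ (year : Int), Dom_annual_center_star_py year → Spec_annual_center_star_py year (annual_center_star_py year)

-- ===== LEMMAS AND PROOFS =====
-- One unfolding of A's digit-sum loop when the guard is false.
theorem pv_reduce_small (m : Int) (h0 : 0 ≤ m) (h9 : m ≤ 9) :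
    reduce_to_digit_py m = m := by
  unfold reduce_to_digit_py
  simp only [pvReduceLoop]
  rw [if_neg (by omega)]

-- For the two-digit sums 10..18 the loop runs exactly once: digit sum = m - 9.
theorem pv_reduce_mid (m : Int) (h0 : 10 ≤ m) (h9 : m ≤ 18) :
    reduce_to_digit_py m = m - 9 := by
  interval_cases m <;> decide

theorem pv_centerLoop_pos (c : Int) (h : 0 < c) (f : Nat) : pvCenterLoop (f + 1) c = c := by
  simp only [pvCenterLoop]
  rw [if_neg (by omega)]

-- For the values m and base that actually occur (m ∈ [0,18], base ∈ {9,10}),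
-- A's two loops compute B's closed form.
theorem pv_key (m b : Int) (hm0 : 0 ≤ m) (hm1 : m ≤ 18) (hb : b = 9 ∨ b = 10) :
    pvCenterLoop ((b - reduce_to_digit_py m).natAbs + 1) (b - reduce_to_digit_py m) =
      (if b - (if m ≠ 0 then 1 + PySem.Int.mod (m - 1) 9 else 0) > 0
       then b - (if m ≠ 0 then 1 + PySem.Int.mod (m - 1) 9 else 0)
       else b - (if m ≠ 0 then 1 + PySem.Int.mod (m - 1) 9 else 0) + 9) := by
  have hmod : PySem.Int.mod (m - 1) 9 = (m - 1) % 9 :=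
    PySem.Int.mod_eq_emod_of_pos (by norm_num)
  rw [hmod]
  have hr : reduce_to_digit_py m = (if m ≠ 0 then 1 + (m - 1) % 9 else 0) := by
    by_cases h10 : m ≤ 9
    · rw [pv_reduce_small m hm0 h10]; split_ifs <;> omega
    · rw [pv_reduce_mid m (by omega) hm1]; split_ifs <;> omega
  have hr9 : reduce_to_digit_py m ≤ 9 := by rw [hr]; split_ifs <;> omega
  have hr0 : 0 ≤ reduce_to_digit_py m := by rw [hr]; split_ifs <;> omega
  rw [← hr]
  by_cases hc : 0 < b - reduce_to_digit_py m
  · rw [pv_centerLoop_pos _ hc, if_pos hc]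
  · have hc0 : b - reduce_to_digit_py m = 0 := by rcases hb with hb | hb <;> omega
    rw [hc0]; decide

-- ===== VERDICT (by name: the statement is the Claim_ definition above) =====
theorem annual_center_star_py_spec : Claim_equal_annual_center_star_py := by
  intro year _
  unfold Spec_annual_center_star_py
  have h100 : PySem.Int.mod year 100 = year % 100 :=
    PySem.Int.mod_eq_emod_of_pos (by norm_num)
  have hyy0 : 0 ≤ year % 100 := Int.emod_nonneg year (by norm_num)
  have hyy1 : year % 100 < 100 := Int.emod_lt_of_pos year (by norm_num)
  have hd : PySem.Int.floordiv (year % 100) 10 = year % 100 / 10 :=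
    PySem.Int.floordiv_eq_ediv_of_pos (by norm_num)
  have hm : PySem.Int.mod (year % 100) 10 = year % 100 % 10 :=
    PySem.Int.mod_eq_emod_of_pos (by norm_num)
  simp only [annual_center_star_py, annual_center_star_py_alt, h100, hd, hm]
  exact pv_key (year % 100 / 10 + year % 100 % 10) (if year ≥ 2000 then 9 else 10)
    (by omega) (by omega) (by split_ifs <;> simp)
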